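-- pv_equiv track=rewrite | github.com/ZhiGuangLu/qcs | QuantumCorrelationSolver/Body.py | create_basis
-- ===== SOURCE A (Python) =====
-- def create_basis(n_exc, max_dims, k):
--     Basis = []
--     mod_num = len(k)
--
--     def dfs(idx, sum_, x):
--         if idx == mod_num:
--             if sum_ == n_exc:
--                 Basis.append(x[:])
--             return
--         for i in range(max_dims[idx] + 1):
--             x[idx] = i
--             if sum_ + i * k[idx] <= n_exc:
--                 dfs(idx + 1, sum_ + i * k[idx], x)
--
--     dfs(0, 0, [0] * mod_num)
--     Basis.reverse()
--     return Basis
-- ===== SOURCE B (Python) =====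
-- def create_basis(n_exc, max_dims, k):
--     # breadth-first: grow a frontier of (partial vector, partial sum) level by level
--     frontier = [([], 0)]
--     for m, w in zip(max_dims, k):
--         frontier = [(x + [i], s + i * w)
--                     for (x, s) in frontier
--                     for i in range(m + 1)
--                     if s + i * w <= n_exc]
--     return [x for (x, s) in reversed(frontier) if s == n_exc]
-- ===== Notes on version B (the rewrite author's own statement) =====
-- stated objective: simpler
-- what changed: Replaced the nested recursive DFS that mutates one shared vector and appends at the leaves by a single breadth-first pass: a frontier of (partial vector, partial sum) pairs is extended level by level with the same feasibility prune, then filtered and reversed.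
-- outside the precondition, e.g. on create_basis(0, [-1], [1, 1]): A returns [], B returns []
import Mathlib
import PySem

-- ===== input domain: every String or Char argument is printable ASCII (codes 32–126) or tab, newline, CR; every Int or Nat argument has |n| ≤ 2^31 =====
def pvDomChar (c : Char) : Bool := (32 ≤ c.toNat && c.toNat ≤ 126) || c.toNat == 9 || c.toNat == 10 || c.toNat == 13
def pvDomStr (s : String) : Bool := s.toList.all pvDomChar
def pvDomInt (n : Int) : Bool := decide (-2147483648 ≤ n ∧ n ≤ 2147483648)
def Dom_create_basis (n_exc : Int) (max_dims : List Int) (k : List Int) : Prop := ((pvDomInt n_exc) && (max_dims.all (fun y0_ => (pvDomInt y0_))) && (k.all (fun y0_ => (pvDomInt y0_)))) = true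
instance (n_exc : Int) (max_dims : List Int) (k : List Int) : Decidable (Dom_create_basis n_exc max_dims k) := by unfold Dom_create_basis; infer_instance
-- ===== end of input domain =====

-- B replaces A's recursive DFS over one mutated vector by an iterative breadth-first
-- frontier expansion (objective: simpler); same values on all inputs admitted by Pre_.

-- ===== PORT A =====
-- dfs(idx, sum_, x): the Python recursion, with rem = mod_num - idx made structural.
-- The shared mutable list x is threaded through explicitly (each call returns its final x);
-- max_dims[idx] / k[idx] are in range under Pre_ (idx < len k ≤ len max_dims), ported as getD.
def pvDfs (n_exc : Int) (max_dims k : List Int) (idx rem : Nat) (sum_ : Int)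
    (x : List Int) (basis : List (List Int)) : List Int × List (List Int) :=
  match rem with
  | 0 => (x, if sum_ == n_exc then basis ++ [x] else basis)
  | rem + 1 =>
    (PySem.List.pyRange 0 (max_dims.getD idx 0 + 1) 1).foldl
      (fun st i =>
        let x' := st.1.set idx i
        if sum_ + i * k.getD idx 0 ≤ n_exc then
          pvDfs n_exc max_dims k (idx + 1) rem (sum_ + i * k.getD idx 0) x' st.2
        else (x', st.2))
      (x, basis)

def create_basis (n_exc : Int) (max_dims : List Int) (k : List Int) : List (List Int) :=
  (pvDfs n_exc max_dims k 0 k.length 0 (List.replicate k.length 0) []).2.reverse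

-- ===== PORT B =====
-- one level of frontier expansion: the inner double comprehension of Source B
def pvStep (n_exc : Int) (fr : List (List Int × Int)) (mw : Int × Int) : List (List Int × Int) :=
  fr.flatMap fun xs =>
    (PySem.List.pyRange 0 (mw.1 + 1) 1).filterMap fun i =>
      if xs.2 + i * mw.2 ≤ n_exc then some (xs.1 ++ [i], xs.2 + i * mw.2) else none

def create_basis_alt (n_exc : Int) (max_dims : List Int) (k : List Int) : List (List Int) :=
  let frontier := (max_dims.zip k).foldl (pvStep n_exc) [([], 0)]
  frontier.reverse.filterMap fun xs => if xs.2 == n_exc then some xs.1 else none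

-- ===== PRECONDITION & SPEC =====
-- Pre_ excludes inputs with len(k) > len(max_dims): on those A raises IndexError whenever the
-- pruned search reaches the missing index (where the search dies earlier, A returns [] and B
-- returns [] too — the exclusion is the natural closed-form superset of the raise condition).
def Pre_create_basis (n_exc : Int) (max_dims : List Int) (k : List Int) : Prop :=
  k.length ≤ max_dims.length
instance (n_exc : Int) (max_dims : List Int) (k : List Int) : Decidable (Pre_create_basis n_exc max_dims k) := by unfold Pre_create_basis; infer_instance
def pvWitness_create_basis : Int × List Int × List Int := (2, [2, 1], [1, 2])

def Spec_create_basis (n_exc : Int) (max_dims : List Int) (k : List Int) (out : List (List Int)) : Prop := out = create_basis_alt n_exc max_dims k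
instance (n_exc : Int) (max_dims : List Int) (k : List Int) (out : List (List Int)) : Decidable (Spec_create_basis n_exc max_dims k out) := by unfold Spec_create_basis; infer_instance

-- ===== CLAIM (what is proved, stated in full; the proofs are below) =====
def Claim_equal_create_basis : Prop := ∀ (n_exc : Int) (max_dims : List Int) (k : List Int), Dom_create_basis n_exc max_dims k → Pre_create_basis n_exc max_dims k → Spec_create_basis n_exc max_dims k (create_basis n_exc max_dims k)

-- ===== LEMMAS AND PROOFS =====

-- the leaf selector applied at the end of B
def pvLeaf (n_exc : Int) (xs : List Int × Int) : Option (List Int) :=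
  if xs.2 == n_exc then some xs.1 else none

-- folding pvStep distributes over the frontier
theorem pvFoldl_step_flatMap (n_exc : Int) (L : List (Int × Int)) :
    ∀ fr : List (List Int × Int),
      L.foldl (pvStep n_exc) fr = fr.flatMap (fun e => L.foldl (pvStep n_exc) [e]) := by
  induction L with
  | nil => intro fr; simp
  | cons mw L ih =>
    intro fr
    simp only [List.foldl_cons]
    rw [ih (pvStep n_exc fr mw)]
    rw [show pvStep n_exc fr mw = fr.flatMap (fun e => pvStep n_exc [e] mw) by
      simp [pvStep]]
    rw [List.flatMap_assoc]
    refine List.flatMap_congr ?_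
    intro e _
    rw [← ih (pvStep n_exc [e] mw)]

-- prefix of a set at the written position
theorem pvTake_set_succ (x : List Int) (idx : Nat) (i : Int) (h : idx < x.length) :
    (x.set idx i).take (idx + 1) = x.take idx ++ [i] := by
  rw [List.take_add_one, List.getElem?_set_self (by simpa using h),
    List.take_set_of_le (le_refl idx)]
  rfl

-- filterMap as a flatMap of Option.toList
theorem pvFilterMap_eq_flatMap {A B : Type} (f : A → Option B) (l : List A) :
    l.filterMap f = l.flatMap (fun a => (f a).toList) := by
  induction l with
  | nil => rfl
  | cons a l ih => cases h : f a <;> simp [h, ih]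

-- main invariant of the DFS
theorem pvDfs_spec (n_exc : Int) (max_dims k : List Int)
    (hlen : k.length ≤ max_dims.length) :
    ∀ (rem idx : Nat) (sum_ : Int) (x : List Int) (basis : List (List Int)),
      idx + rem = k.length → x.length = k.length →
      (pvDfs n_exc max_dims k idx rem sum_ x basis).1.length = k.length ∧
      (pvDfs n_exc max_dims k idx rem sum_ x basis).1.take idx = x.take idx ∧
      (pvDfs n_exc max_dims k idx rem sum_ x basis).2 =
        basis ++ (((max_dims.zip k).drop idx).foldl (pvStep n_exc)
          [(x.take idx, sum_)]).filterMap (pvLeaf n_exc) := by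
  intro rem
  induction rem with
  | zero =>
    intro idx sum_ x basis hidx hx
    have hidx' : idx = k.length := by omega
    have hdrop : (max_dims.zip k).drop idx = [] := by
      apply List.drop_eq_nil_of_le
      simp [List.length_zip]; omega
    have hxt : x.take idx = x := by rw [List.take_of_length_le]; omega
    refine ⟨hx, rfl, ?_⟩
    simp [pvDfs, hdrop, hxt, pvLeaf]
    by_cases h : sum_ = n_exc <;> simp [h]
  | succ rem ih =>
    intro idx sum_ x basis hidx hx
    have hik : idx < k.length := by omega
    have him : idx < max_dims.length := by omega
    -- the zip list splits at idx
    have hzlen : idx < (max_dims.zip k).length := by simp [List.length_zip]; omega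
    have hdrop : (max_dims.zip k).drop idx
        = (max_dims.getD idx 0, k.getD idx 0) :: (max_dims.zip k).drop (idx + 1) := by
      rw [List.drop_eq_getElem_cons hzlen]
      congr 1
      simp [List.getElem_zip, him, hik]
    -- generalized loop lemma over the range list
    have loop : ∀ (is : List Int) (x0 : List Int) (b0 : List (List Int)),
        x0.length = k.length → x0.take idx = x.take idx →
        (is.foldl (fun st i =>
            let x' := st.1.set idx i
            if sum_ + i * k.getD idx 0 ≤ n_exc then
              pvDfs n_exc max_dims k (idx + 1) rem (sum_ + i * k.getD idx 0) x' st.2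
            else (x', st.2)) (x0, b0)).1.length = k.length ∧
        (is.foldl (fun st i =>
            let x' := st.1.set idx i
            if sum_ + i * k.getD idx 0 ≤ n_exc then
              pvDfs n_exc max_dims k (idx + 1) rem (sum_ + i * k.getD idx 0) x' st.2
            else (x', st.2)) (x0, b0)).1.take idx = x.take idx ∧
        (is.foldl (fun st i =>
            let x' := st.1.set idx i
            if sum_ + i * k.getD idx 0 ≤ n_exc then
              pvDfs n_exc max_dims k (idx + 1) rem (sum_ + i * k.getD idx 0) x' st.2
            else (x', st.2)) (x0, b0)).2 =
          b0 ++ (is.flatMap (fun i =>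
            if sum_ + i * k.getD idx 0 ≤ n_exc then
              (((max_dims.zip k).drop (idx + 1)).foldl (pvStep n_exc)
                [(x.take idx ++ [i], sum_ + i * k.getD idx 0)]).filterMap (pvLeaf n_exc)
            else [])) := by
      intro is
      induction is with
      | nil => intro x0 b0 h1 h2; exact ⟨h1, h2, by simp⟩
      | cons i is ihl =>
        intro x0 b0 h1 h2
        simp only [List.foldl_cons, List.flatMap_cons]
        have hset : (x0.set idx i).length = k.length := by simp [h1]
        have hsetp : (x0.set idx i).take idx = x.take idx := by
          rw [List.take_set_of_le (le_refl idx)]; exact h2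
        by_cases hc : sum_ + i * k.getD idx 0 ≤ n_exc
        · simp only [if_pos hc]
          obtain ⟨d1, d2, d3⟩ := ih (idx + 1) (sum_ + i * k.getD idx 0) (x0.set idx i)
            b0 (by omega) hset
          have hpre : (x0.set idx i).take (idx + 1) = x.take idx ++ [i] := by
            rw [pvTake_set_succ _ _ _ (by omega), h2]
          have d2' : (pvDfs n_exc max_dims k (idx+1) rem (sum_ + i * k.getD idx 0) (x0.set idx i) b0).1.take idx = x.take idx := by
            have := congrArg (List.take idx) d2
            rw [List.take_take] at this
            simp only [Nat.min_def] at this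
            rw [if_pos (by omega)] at this
            rw [this, List.take_take]
            simp [hsetp]
          obtain ⟨e1, e2, e3⟩ := ihl _ _ d1 d2'
          refine ⟨e1, e2, ?_⟩
          rw [e3, d3, hpre]
          simp only [List.append_assoc]
        · simp only [if_neg hc]
          obtain ⟨e1, e2, e3⟩ := ihl (x0.set idx i) b0 hset hsetp
          refine ⟨e1, e2, ?_⟩
          rw [e3]
          simp only [List.nil_append]
    obtain ⟨l1, l2, l3⟩ := loop (PySem.List.pyRange 0 (max_dims.getD idx 0 + 1) 1) x basis hx rfl
    refine ⟨by simpa [pvDfs] using l1, by simpa [pvDfs] using l2, ?_⟩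
    show (pvDfs n_exc max_dims k idx (rem+1) sum_ x basis).2 = _
    rw [show (pvDfs n_exc max_dims k idx (rem+1) sum_ x basis).2
        = ((PySem.List.pyRange 0 (max_dims.getD idx 0 + 1) 1).foldl (fun st i =>
            let x' := st.1.set idx i
            if sum_ + i * k.getD idx 0 ≤ n_exc then
              pvDfs n_exc max_dims k (idx + 1) rem (sum_ + i * k.getD idx 0) x' st.2
            else (x', st.2)) (x, basis)).2 from rfl]
    rw [l3, hdrop]
    congr 1
    -- match the flatMap of per-i sub-results with one BFS step followed by the remaining fold
    rw [List.foldl_cons]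
    rw [show pvStep n_exc [(x.take idx, sum_)] (max_dims.getD idx 0, k.getD idx 0)
        = (PySem.List.pyRange 0 (max_dims.getD idx 0 + 1) 1).filterMap (fun i =>
            if sum_ + i * k.getD idx 0 ≤ n_exc then
              some (x.take idx ++ [i], sum_ + i * k.getD idx 0) else none) by
      simp [pvStep]]
    rw [pvFoldl_step_flatMap, List.filterMap_flatMap, pvFilterMap_eq_flatMap,
      List.flatMap_assoc]
    refine List.flatMap_congr ?_
    intro i _
    split_ifs <;> simp

-- ===== VERDICT (by name: the statement is the Claim_ definition above) =====
theorem create_basis_spec : Claim_equal_create_basis := by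
  intro n_exc max_dims k _ hpre
  unfold Spec_create_basis create_basis create_basis_alt
  obtain ⟨-, -, h⟩ := pvDfs_spec n_exc max_dims k hpre k.length 0 0
    (List.replicate k.length 0) [] (by omega) (by simp)
  rw [h]
  simp [List.filterMap_reverse, pvLeaf]
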